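-- pv_equiv track=rewrite | github.com/finos/morphir | substrate/examples/fr2052a-lcr/structured/scripts/extract_vii.py | build_intro
-- ===== SOURCE A (Python) =====
-- def build_intro(page_text: str) -> tuple[str, list[str]]:
--     """
--     Parse the intro page (page 180) to extract the header, intro paragraph,
--     Key section, and schedule heading. Returns (intro_md, remaining_lines).
--     """
--     lines = page_text.split("\n")
--
--     intro_parts = []
--     remaining = []
--     state = "before_key"
--     key_rows = []
--
--     idx = 0
--     while idx < len(lines):
--         line = lines[idx].strip()
--         idx += 1
--
--         if not line:
--             continue
--
--         if line == "APPENDIX VII: Short-Term Wholesale Funding (STWF) to FR 2052a Mapping":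
--             # Title is the H1 (used in the file heading)
--             continue
--
--         if state == "before_key":
--             if line == "Key":
--                 state = "in_key"
--                 continue
--             intro_parts.append(line)
--             continue
--
--         if state == "in_key":
--             if line.startswith("FR 2052a to FR Y"):
--                 state = "after_key"
--                 remaining.append(line)
--                 continue
--             # Parse key rows: "* Values relevant ..." / "# Values ..." / "NULL ..."
--             if line.startswith("*"):
--                 key_rows.append(("\\*", line[1:].strip()))
--             elif line.startswith("#"):
--                 key_rows.append(("#", line[1:].strip()))
--             elif line.startswith("NULL"):
--                 key_rows.append(("NULL", line[4:].strip()))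
--             continue
--
--         if state == "after_key":
--             remaining.append(line)
--
--     # Build intro markdown
--     parts = []
--     # Paragraph (join wrapped lines)
--     para = " ".join(intro_parts)
--     parts.append(para)
--     parts.append("")
--     # Key table
--     parts.append("## Key")
--     parts.append("")
--     parts.append("| Symbol | Meaning |")
--     parts.append("|--------|---------|")
--     for sym, meaning in key_rows:
--         parts.append(f"| `{sym}` | {meaning} |")
--     parts.append("")
--
--     return "\n".join(parts), remaining
-- ===== SOURCE B (Python) =====
-- TITLE = "APPENDIX VII: Short-Term Wholesale Funding (STWF) to FR 2052a Mapping"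
--
-- def _classify(s):
--     if s.startswith("*"):
--         return ("\\*", s[1:].strip())
--     if s.startswith("#"):
--         return ("#", s[1:].strip())
--     if s.startswith("NULL"):
--         return ("NULL", s[4:].strip())
--     return None
--
-- def build_intro(page_text: str) -> tuple[str, list[str]]:
--     # Region-based decomposition: clean lines once, cut at the two markers, classify each region.
--     cleaned = [s for s in (l.strip() for l in page_text.split("\n")) if s and s != TITLE]
--     if "Key" in cleaned:
--         i = cleaned.index("Key")
--         intro_lines, rest = cleaned[:i], cleaned[i + 1:]
--     else:
--         intro_lines, rest = cleaned, []
--     j = next((k for k, s in enumerate(rest) if s.startswith("FR 2052a to FR Y")), len(rest))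
--     key_body, remaining = rest[:j], rest[j:]
--     rows = [r for r in map(_classify, key_body) if r is not None]
--     md = "\n".join([" ".join(intro_lines), "", "## Key", "", "| Symbol | Meaning |",
--                     "|--------|---------|", *("| `%s` | %s |" % r for r in rows), ""])
--     return md, remaining
-- ===== Notes on version B (the rewrite author's own statement) =====
-- stated objective: alternative
-- what changed: A's single-pass three-state machine is replaced by a region decomposition: clean the lines once, cut the list at the key-marker line and at the first schedule-heading line, then join the intro region, classify the key region and keep the tail as remaining.
import Mathlib
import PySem

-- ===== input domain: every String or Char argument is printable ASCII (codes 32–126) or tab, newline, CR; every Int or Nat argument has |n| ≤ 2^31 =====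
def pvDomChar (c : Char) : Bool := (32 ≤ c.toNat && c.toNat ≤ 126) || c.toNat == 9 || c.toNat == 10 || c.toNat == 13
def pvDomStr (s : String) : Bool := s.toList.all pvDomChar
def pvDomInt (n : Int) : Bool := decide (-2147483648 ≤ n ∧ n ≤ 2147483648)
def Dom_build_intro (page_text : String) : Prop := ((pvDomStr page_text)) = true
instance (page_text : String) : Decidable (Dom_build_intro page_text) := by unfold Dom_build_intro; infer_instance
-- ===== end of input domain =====

-- B replaces A's one-pass three-state machine by a region decomposition (clean once, cut at the
-- two markers, classify each region separately); objective: alternative structure, same cost.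

-- ===== PORT A =====
-- literal port of A's while-loop state machine
def pvTitle : String := "APPENDIX VII: Short-Term Wholesale Funding (STWF) to FR 2052a Mapping"

inductive PvSt : Type
  | before | inKey | after
deriving DecidableEq, Repr

def pvLoopA : List String → PvSt → List String → List String → List (String × String) →
    List String × List String × List (String × String)
  | [], _, intro, rem, rows => (intro, rem, rows)
  | raw :: rest, st, intro, rem, rows =>
    let line := PySem.Str.strip raw
    if line = "" then pvLoopA rest st intro rem rows
    else if line = pvTitle then pvLoopA rest st intro rem rows
    else match st with
      | .before =>
        if line = "Key" then pvLoopA rest .inKey intro rem rows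
        else pvLoopA rest .before (intro ++ [line]) rem rows
      | .inKey =>
        if PySem.Str.startswith line "FR 2052a to FR Y" then
          pvLoopA rest .after intro (rem ++ [line]) rows
        else if PySem.Str.startswith line "*" then
          pvLoopA rest .inKey intro rem (rows ++ [("\\*", PySem.Str.strip (PySem.Str.slice line (some 1) none))])
        else if PySem.Str.startswith line "#" then
          pvLoopA rest .inKey intro rem (rows ++ [("#", PySem.Str.strip (PySem.Str.slice line (some 1) none))])
        else if PySem.Str.startswith line "NULL" then
          pvLoopA rest .inKey intro rem (rows ++ [("NULL", PySem.Str.strip (PySem.Str.slice line (some 4) none))])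
        else pvLoopA rest .inKey intro rem rows
      | .after => pvLoopA rest .after intro (rem ++ [line]) rows

def build_intro (page_text : String) : String × List String :=
  let lines := (PySem.Str.split? page_text "\n").getD []   -- sep "\n" ≠ "", so split? is always some
  let res := pvLoopA lines .before [] [] []
  let parts := [PySem.Str.join " " res.1, "", "## Key", "", "| Symbol | Meaning |", "|--------|---------|"]
      ++ res.2.2.map (fun r => "| `" ++ r.1 ++ "` | " ++ r.2 ++ " |") ++ [""]
  (PySem.Str.join "\n" parts, res.2.1)

-- ===== PORT B =====
-- literal port of Source B: clean once, slice at the markers, classify the key region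
def pvClassify (s : String) : Option (String × String) :=
  if PySem.Str.startswith s "*" then some ("\\*", PySem.Str.strip (PySem.Str.slice s (some 1) none))
  else if PySem.Str.startswith s "#" then some ("#", PySem.Str.strip (PySem.Str.slice s (some 1) none))
  else if PySem.Str.startswith s "NULL" then some ("NULL", PySem.Str.strip (PySem.Str.slice s (some 4) none))
  else none

def build_intro_alt (page_text : String) : String × List String :=
  let cleaned := (((PySem.Str.split? page_text "\n").getD []).map PySem.Str.strip).filter
      (fun s => s ≠ "" && s ≠ pvTitle)
  let ir : List String × List String :=
    match PySem.List.index? cleaned "Key" with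
    | some i => (cleaned.take i, cleaned.drop (i + 1))
    | none => (cleaned, [])
  let j := ir.2.findIdx (fun s => PySem.Str.startswith s "FR 2052a to FR Y")
  let rows := (ir.2.take j).filterMap pvClassify
  let md := PySem.Str.join "\n"
      ([PySem.Str.join " " ir.1, "", "## Key", "", "| Symbol | Meaning |", "|--------|---------|"]
        ++ rows.map (fun r => "| `" ++ r.1 ++ "` | " ++ r.2 ++ " |") ++ [""])
  (md, ir.2.drop j)

-- ===== PRECONDITION & SPEC =====
def Spec_build_intro (page_text : String) (out : String × List String) : Prop := out = build_intro_alt page_text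
instance (page_text : String) (out : String × List String) : Decidable (Spec_build_intro page_text out) := by unfold Spec_build_intro; infer_instance

-- ===== CLAIM (what is proved, stated in full; the proofs are below) =====
def Claim_equal_build_intro : Prop := ∀ (page_text : String), Dom_build_intro page_text → Spec_build_intro page_text (build_intro page_text)

-- ===== LEMMAS AND PROOFS =====

-- proof-only helper: A's machine restricted to the already-cleaned lines
def pvLoopC : List String → PvSt → List String → List String → List (String × String) →
    List String × List String × List (String × String)
  | [], _, intro, rem, rows => (intro, rem, rows)
  | line :: rest, st, intro, rem, rows =>
    match st with
    | .before =>
      if line = "Key" then pvLoopC rest .inKey intro rem rows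
      else pvLoopC rest .before (intro ++ [line]) rem rows
    | .inKey =>
      if PySem.Str.startswith line "FR 2052a to FR Y" then
        pvLoopC rest .after intro (rem ++ [line]) rows
      else pvLoopC rest .inKey intro rem (rows ++ (pvClassify line).toList)
    | .after => pvLoopC rest .after intro (rem ++ [line]) rows

theorem pvLoopA_eq_loopC (ls : List String) (st : PvSt) (intro rem : List String)
    (rows : List (String × String)) :
    pvLoopA ls st intro rem rows =
      pvLoopC ((ls.map PySem.Str.strip).filter (fun s => s ≠ "" && s ≠ pvTitle)) st intro rem rows := by
  induction ls generalizing st intro rem rows with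
  | nil => rfl
  | cons raw rest ih =>
    simp only [pvLoopA, List.map_cons, List.filter_cons]
    by_cases h1 : PySem.Str.strip raw = ""
    · simp [h1, ih]
    · by_cases h2 : PySem.Str.strip raw = pvTitle
      · simp [h2, ih]
      · rw [if_pos (show (decide (PySem.Str.strip raw ≠ "") && decide (PySem.Str.strip raw ≠ pvTitle)) = true by simp [h1, h2])]
        rw [if_neg h1, if_neg h2]
        cases st with
        | before =>
          simp only [pvLoopC]
          by_cases hk : PySem.Str.strip raw = "Key" <;> simp [hk, ih]
        | inKey =>
          simp only [pvLoopC, pvClassify]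
          split_ifs <;> rw [ih] <;> simp
        | after => simp only [pvLoopC]; rw [ih]

theorem pvLoopC_after (ls : List String) (intro rem : List String) (rows : List (String × String)) :
    pvLoopC ls .after intro rem rows = (intro, rem ++ ls, rows) := by
  induction ls generalizing rem with
  | nil => simp [pvLoopC]
  | cons l rest ih => simp [pvLoopC, ih]

theorem pvLoopC_inKey (ls : List String) (intro rem : List String) (rows : List (String × String)) :
    pvLoopC ls .inKey intro rem rows =
      (intro,
       rem ++ ls.drop (ls.findIdx (fun s => PySem.Str.startswith s "FR 2052a to FR Y")),
       rows ++ (ls.take (ls.findIdx (fun s => PySem.Str.startswith s "FR 2052a to FR Y"))).filterMap pvClassify) := by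
  induction ls generalizing rem rows with
  | nil => simp [pvLoopC]
  | cons l rest ih =>
    simp only [pvLoopC, List.findIdx_cons, Bool.cond_eq_ite]
    by_cases hf : PySem.Str.startswith l "FR 2052a to FR Y" = true
    · rw [if_pos hf, if_pos hf, pvLoopC_after]
      simp
    · rw [if_neg hf, if_neg hf, ih]
      cases hc : pvClassify l <;> simp [hc, List.take_succ_cons, List.drop_succ_cons]

theorem pvLoopC_before (ls : List String) (intro rem : List String) (rows : List (String × String)) :
    pvLoopC ls .before intro rem rows =
      match PySem.List.index? ls "Key" with
      | some i => pvLoopC (ls.drop (i + 1)) .inKey (intro ++ ls.take i) rem rows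
      | none => (intro ++ ls, rem, rows) := by
  induction ls generalizing intro with
  | nil => simp [pvLoopC, PySem.List.index?]
  | cons l rest ih =>
    by_cases hk : l = "Key"
    · subst hk
      rw [PySem.List.index?_cons_self]
      simp [pvLoopC]
    · rw [PySem.List.index?_cons_of_ne rest hk]
      simp only [pvLoopC, hk, if_false]
      rw [ih]
      cases h : PySem.List.index? rest "Key" with
      | none => simp
      | some i => simp [List.take_succ_cons, List.drop_succ_cons]

-- ===== VERDICT (by name: the statement is the Claim_ definition above) =====
theorem build_intro_spec : Claim_equal_build_intro := by
  intro page_text _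
  unfold Spec_build_intro build_intro build_intro_alt
  simp only []
  rw [pvLoopA_eq_loopC, pvLoopC_before]
  cases h : PySem.List.index? (((PySem.Str.split? page_text "\n").getD []).map PySem.Str.strip
      |>.filter (fun s => s ≠ "" && s ≠ pvTitle)) "Key" with
  | none => simp
  | some i => simp [pvLoopC_inKey]
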